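-- pv_equiv track=rewrite | github.com/blueberryade/algorithm | 프로그래머스/2/42626. 더 맵게/더 맵게.py | solution
-- ===== SOURCE A (Python) =====
-- import heapq
--
-- def solution(scoville, K):
--     answer = 0
--     q = []
--     for s in scoville:
--         heapq.heappush(q,s)
--
--     while q[0] < K:
--         tmp1 = heapq.heappop(q)
--         tmp2 = heapq.heappop(q)
--         heapq.heappush(q,tmp1+tmp2*2)
--         answer+=1
--
--         if len(q) == 1 and q[0] < K:
--             return -1
--     return answer
-- ===== SOURCE B (Python) =====
-- def solution(scoville, K):
--     lst = sorted(scoville)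
--     answer = 0
--     while lst[0] < K:
--         tmp1 = lst.pop(0)
--         tmp2 = lst.pop(0)
--         new = tmp1 + tmp2 * 2
--         pos = 0
--         while pos < len(lst) and lst[pos] < new:
--             pos += 1
--         lst.insert(pos, new)
--         answer += 1
--         if len(lst) == 1 and lst[0] < K:
--             return -1
--     return answer
-- ===== Notes on version B (the rewrite author's own statement) =====
-- stated objective: alternative
-- what changed: Replaces the binary heap by a plain list kept in sorted order: sort once up front, take the two smallest from the front, re-insert the mix with an ordered linear-scan insert.
import Mathlib
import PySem

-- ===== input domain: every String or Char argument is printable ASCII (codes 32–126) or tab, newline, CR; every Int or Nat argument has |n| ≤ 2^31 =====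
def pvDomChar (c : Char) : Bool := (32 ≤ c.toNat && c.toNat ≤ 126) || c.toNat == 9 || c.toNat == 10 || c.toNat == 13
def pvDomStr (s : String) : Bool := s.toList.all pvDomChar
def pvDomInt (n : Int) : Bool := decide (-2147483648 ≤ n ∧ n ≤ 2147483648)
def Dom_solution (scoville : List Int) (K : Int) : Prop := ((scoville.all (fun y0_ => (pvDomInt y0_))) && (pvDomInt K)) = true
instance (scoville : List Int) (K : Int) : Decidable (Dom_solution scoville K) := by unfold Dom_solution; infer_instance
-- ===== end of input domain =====

-- B replaces A's heap by a list kept in sorted order (sort once, pop the two heads,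
-- ordered re-insert): a different data structure of similar cost, not claimed faster.

-- ===== PORT A =====
-- A's heap q is ported value-faithfully: heappush appends the element, q[0] (the heap
-- root) is the minimum, heappop removes the first occurrence of the minimum.  Python's
-- IndexError on q[0]/heappop of an empty heap is the `none`/[] branch (returns a junk 0,
-- excluded by Pre_solution).
def solutionLoop (q : List Int) (K : Int) (answer : Int) : Int :=
  match hq : PySem.List.min? q (fun x => x) with
  | none => 0      -- q[0] raises IndexError (empty heap); excluded by Pre_solution
  | some m =>
    if m < K then
      -- tmp1 = heappop(q); tmp2 = heappop(q); heappush(q, tmp1+tmp2*2)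
      match hq1 : PySem.List.min? (q.erase m) (fun x => x) with
      | none => 0  -- second heappop raises IndexError; excluded by Pre_solution
      | some m2 =>
        if ((q.erase m).erase m2 ++ [m + m2 * 2]).length = 1 ∧
            ((q.erase m).erase m2 ++ [m + m2 * 2]).headD 0 < K then -1
        else solutionLoop ((q.erase m).erase m2 ++ [m + m2 * 2]) K (answer + 1)
    else answer
termination_by q.length
decreasing_by
  have hm : m ∈ q := PySem.List.min?_mem hq
  have hm2 : m2 ∈ q.erase m := PySem.List.min?_mem hq1
  have h1 := List.length_erase_of_mem hm
  have h2 := List.length_erase_of_mem hm2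
  have h3 : 0 < (q.erase m).length := List.length_pos_of_mem hm2
  simp only [List.length_append, List.length_cons, List.length_nil]
  omega

def solution (scoville : List Int) (K : Int) : Int :=
  let q := scoville.foldl (fun acc s => acc ++ [s]) []   -- for s in scoville: heappush(q, s)
  solutionLoop q K 0

-- ===== PORT B =====
-- the inner `while pos < len(lst) and lst[pos] < new … lst.insert(pos, new)` scan
def binsert (v : Int) (l : List Int) : List Int :=
  match l with
  | [] => [v]
  | x :: xs => if x < v then x :: binsert v xs else v :: x :: xs

-- length fact cited by solutionAltLoop's termination proof
lemma binsert_length (v : Int) (l : List Int) : (binsert v l).length = l.length + 1 := by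
  induction l with
  | nil => rfl
  | cons a t ih => simp only [binsert]; split <;> simp [ih]

def solutionAltLoop (l : List Int) (K : Int) (answer : Int) : Int :=
  match l with
  | [] => 0        -- lst[0] raises IndexError; excluded by Pre_solution
  | x :: rest =>
    if x < K then
      match rest with
      | [] => 0    -- second lst.pop(0) raises IndexError; excluded by Pre_solution
      | y :: rest2 =>
        if (binsert (x + y * 2) rest2).length = 1 ∧
            (binsert (x + y * 2) rest2).headD 0 < K then -1
        else solutionAltLoop (binsert (x + y * 2) rest2) K (answer + 1)
    else answer
termination_by l.length
decreasing_by
  simp only [binsert_length]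
  simp

def solution_alt (scoville : List Int) (K : Int) : Int :=
  solutionAltLoop (PySem.List.sorted scoville (fun x => x) false) K 0

-- ===== PRECONDITION & SPEC =====
-- Pre_ excludes exactly the inputs where BOTH Pythons raise IndexError: the empty list
-- (q[0]) and a single element below K (the second heappop / second lst.pop(0)).
def Pre_solution (scoville : List Int) (K : Int) : Prop :=
  scoville ≠ [] ∧ (scoville.length = 1 → K ≤ scoville.headD 0)
instance (scoville : List Int) (K : Int) : Decidable (Pre_solution scoville K) := by unfold Pre_solution; infer_instance
def pvWitness_solution : List Int × Int := ([1, 2, 3, 9, 10, 12], 7)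

def Spec_solution (scoville : List Int) (K : Int) (out : Int) : Prop := out = solution_alt scoville K
instance (scoville : List Int) (K : Int) (out : Int) : Decidable (Spec_solution scoville K out) := by unfold Spec_solution; infer_instance

-- ===== CLAIM (what is proved, stated in full; the proofs are below) =====
def Claim_equal_solution : Prop := ∀ (scoville : List Int) (K : Int), Dom_solution scoville K → Pre_solution scoville K → Spec_solution scoville K (solution scoville K)

-- ===== LEMMAS AND PROOFS =====

-- unfolding lemmas for the two loops
lemma loop_none (q : List Int) (K answer : Int)
    (h : PySem.List.min? q (fun x => x) = none) : solutionLoop q K answer = 0 := by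
  conv_lhs => unfold solutionLoop
  split
  · rfl
  · next m heq => rw [h] at heq; cases heq

lemma loop_some_none (q : List Int) (K answer m : Int)
    (h : PySem.List.min? q (fun x => x) = some m)
    (h2 : PySem.List.min? (q.erase m) (fun x => x) = none) :
    solutionLoop q K answer = if m < K then 0 else answer := by
  conv_lhs => unfold solutionLoop
  split
  · next heq => rw [h] at heq; cases heq
  · next m' heq =>
      rw [h] at heq
      cases heq
      by_cases hmK : m < K
      · rw [if_pos hmK, if_pos hmK]
        split
        · rfl
        · next m2 heq2 => rw [h2] at heq2; cases heq2
      · rw [if_neg hmK, if_neg hmK]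

lemma loop_some_some (q : List Int) (K answer m m2 : Int)
    (h : PySem.List.min? q (fun x => x) = some m)
    (h2 : PySem.List.min? (q.erase m) (fun x => x) = some m2) :
    solutionLoop q K answer =
      if m < K then
        (if ((q.erase m).erase m2 ++ [m + m2 * 2]).length = 1 ∧
            ((q.erase m).erase m2 ++ [m + m2 * 2]).headD 0 < K then -1
         else solutionLoop ((q.erase m).erase m2 ++ [m + m2 * 2]) K (answer + 1))
      else answer := by
  conv_lhs => unfold solutionLoop
  split
  · next heq => rw [h] at heq; cases heq
  · next m' heq =>
      rw [h] at heq
      cases heq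
      by_cases hmK : m < K
      · rw [if_pos hmK, if_pos hmK]
        split
        · next heq2 => rw [h2] at heq2; cases heq2
        · next m2' heq2 => rw [h2] at heq2; cases heq2; rfl
      · rw [if_neg hmK, if_neg hmK]

lemma altLoop_nil (K answer : Int) : solutionAltLoop [] K answer = 0 := by
  conv_lhs => unfold solutionAltLoop

lemma altLoop_single (x K answer : Int) :
    solutionAltLoop [x] K answer = if x < K then 0 else answer := by
  conv_lhs => unfold solutionAltLoop

lemma altLoop_cons2 (x y : Int) (rest2 : List Int) (K answer : Int) :
    solutionAltLoop (x :: y :: rest2) K answer =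
      if x < K then
        (if (binsert (x + y * 2) rest2).length = 1 ∧
            (binsert (x + y * 2) rest2).headD 0 < K then -1
         else solutionAltLoop (binsert (x + y * 2) rest2) K (answer + 1))
      else answer := by
  conv_lhs => unfold solutionAltLoop

lemma binsert_eq_orderedInsert (v : Int) (l : List Int) :
    binsert v l = List.orderedInsert (· ≤ ·) v l := by
  induction l with
  | nil => rfl
  | cons x xs ih =>
      simp only [binsert, List.orderedInsert]
      rcases lt_or_ge x v with h | h
      · rw [if_pos h, if_neg (by omega), ih]
      · rw [if_neg (by omega), if_pos h]

lemma binsert_perm (v : Int) (l : List Int) : (binsert v l).Perm (v :: l) := by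
  rw [binsert_eq_orderedInsert]; exact List.perm_orderedInsert _ _ _

lemma binsert_sorted (v : Int) (l : List Int) (h : l.Pairwise (· ≤ ·)) :
    (binsert v l).Pairwise (· ≤ ·) := by
  rw [binsert_eq_orderedInsert]
  exact List.Pairwise.orderedInsert v l h

-- head of a ≤-sorted permutation is the (value of the) minimum
lemma min_of_sorted_perm (q rest : List Int) (x : Int)
    (hp : (x :: rest).Perm q) (hs : (x :: rest).Pairwise (· ≤ ·)) :
    PySem.List.min? q (fun y => y) = some x := by
  have hxq : x ∈ q := hp.mem_iff.mp (List.mem_cons_self)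
  obtain ⟨m, hm⟩ : ∃ m, PySem.List.min? q (fun y => y) = some m := by
    cases hmq : PySem.List.min? q (fun y => y) with
    | none =>
        exfalso
        have : q = [] := (PySem.List.min?_eq_none_iff _ _).mp hmq
        simp [this] at hxq
    | some m => exact ⟨m, rfl⟩
  have hmem : m ∈ q := PySem.List.min?_mem hm
  have hml : m ∈ x :: rest := hp.mem_iff.mpr hmem
  have hx_le : x ≤ m := by
    rcases List.mem_cons.mp hml with h | h
    · omega
    · exact List.rel_of_pairwise_cons hs h
  have hm_le : m ≤ x := PySem.List.min?_isMin hm x hxq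
  rw [hm, show m = x by omega]

-- the loops agree on permuted states (B's state sorted)
lemma loop_eq (n : Nat) : ∀ (q l : List Int) (K answer : Int),
    q.length ≤ n → l.Perm q → l.Pairwise (· ≤ ·) →
    solutionLoop q K answer = solutionAltLoop l K answer := by
  induction n with
  | zero =>
      intro q l K answer hn hp _
      have hq : q = [] := List.length_eq_zero_iff.mp (by omega)
      have hl : l = [] := List.length_eq_zero_iff.mp (by simpa [hq] using hp.length_eq)
      subst hq hl
      rw [altLoop_nil, loop_none _ _ _ ((PySem.List.min?_eq_none_iff _ _).mpr rfl)]
  | succ n ih =>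
      intro q l K answer hn hp hs
      match l with
      | [] =>
          have hq : q = [] := by
            have := hp.length_eq; simp at this; exact List.length_eq_zero_iff.mp this.symm
          subst hq
          rw [altLoop_nil, loop_none _ _ _ ((PySem.List.min?_eq_none_iff _ _).mpr rfl)]
      | x :: rest =>
          have hmin : PySem.List.min? q (fun y => y) = some x :=
            min_of_sorted_perm q rest x hp hs
          have hp1 : rest.Perm (q.erase x) := by
            have := hp.erase x
            simpa [List.erase_cons_head] using this
          have hs1 : rest.Pairwise (· ≤ ·) := List.Pairwise.of_cons hs
          match rest with
          | [] =>
              have hq1 : PySem.List.min? (q.erase x) (fun y => y) = none := by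
                have : q.erase x = [] := by
                  have := hp1.length_eq; simp at this
                  exact List.length_eq_zero_iff.mp this.symm
                exact (PySem.List.min?_eq_none_iff _ _).mpr this
              rw [altLoop_single, loop_some_none _ _ _ _ hmin hq1]
          | y :: rest2 =>
              have hmin2 : PySem.List.min? (q.erase x) (fun z => z) = some y :=
                min_of_sorted_perm (q.erase x) rest2 y hp1 hs1
              rw [altLoop_cons2, loop_some_some _ _ _ _ _ hmin hmin2]
              by_cases hxK : x < K
              · rw [if_pos hxK, if_pos hxK]
                have ha : rest2.Perm ((q.erase x).erase y) := by
                  have := hp1.erase y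
                  simpa [List.erase_cons_head] using this
                have hp2 : (binsert (x + y * 2) rest2).Perm
                    ((q.erase x).erase y ++ [x + y * 2]) :=
                  ((binsert_perm _ _).trans (ha.cons _)).trans
                    (List.perm_append_singleton _ _).symm
                have hs2 : (binsert (x + y * 2) rest2).Pairwise (· ≤ ·) :=
                  binsert_sorted _ _ (List.Pairwise.of_cons hs1)
                have hA : ((q.erase x).erase y ++ [x + y * 2]).length =
                    ((q.erase x).erase y).length + 1 := by simp
                have hB : (binsert (x + y * 2) rest2).length = rest2.length + 1 :=
                  binsert_length _ _
                have hBA : rest2.length = ((q.erase x).erase y).length := ha.length_eq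
                have hcond : (((q.erase x).erase y ++ [x + y * 2]).length = 1 ∧
                      ((q.erase x).erase y ++ [x + y * 2]).headD 0 < K) ↔
                    ((binsert (x + y * 2) rest2).length = 1 ∧
                      (binsert (x + y * 2) rest2).headD 0 < K) := by
                  constructor
                  · rintro ⟨h1, h2⟩
                    have hE : (q.erase x).erase y = [] :=
                      List.length_eq_zero_iff.mp (by omega)
                    have hbs : binsert (x + y * 2) rest2 = [x + y * 2] :=
                      List.perm_singleton.mp (by simpa [hE] using hp2)
                    refine ⟨by simp [hbs], ?_⟩
                    rw [hbs]
                    simpa [hE] using h2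
                  · rintro ⟨h1, h2⟩
                    have hE : (q.erase x).erase y = [] :=
                      List.length_eq_zero_iff.mp (by omega)
                    have hbs : binsert (x + y * 2) rest2 = [x + y * 2] :=
                      List.perm_singleton.mp (by simpa [hE] using hp2)
                    refine ⟨by simp [hE], ?_⟩
                    rw [hbs] at h2
                    simpa [hE] using h2
                by_cases hc : ((q.erase x).erase y ++ [x + y * 2]).length = 1 ∧
                    ((q.erase x).erase y ++ [x + y * 2]).headD 0 < K
                · rw [if_pos hc, if_pos (hcond.mp hc)]
                · rw [if_neg hc, if_neg (fun h => hc (hcond.mpr h))]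
                  apply ih
                  · have hxq : x ∈ q := hp.mem_iff.mp (List.mem_cons_self)
                    have hyq : y ∈ q.erase x := hp1.mem_iff.mp (List.mem_cons_self)
                    have h1 := List.length_erase_of_mem hxq
                    have h2 := List.length_erase_of_mem hyq
                    have h3 : 0 < (q.erase x).length := List.length_pos_of_mem hyq
                    have h4 : 0 < q.length := List.length_pos_of_mem hxq
                    simp only [List.length_append, List.length_cons, List.length_nil]
                    omega
                  · exact hp2
                  · exact hs2
              · rw [if_neg hxK, if_neg hxK]

-- ===== VERDICT (by name: the statement is the Claim_ definition above) =====
theorem solution_spec : Claim_equal_solution := by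
  intro scoville K _ _
  unfold Spec_solution solution solution_alt
  simp only [PySem.List.foldl_append_singleton, List.nil_append]
  exact loop_eq scoville.length scoville _ K 0 le_rfl
    (PySem.List.sorted_perm scoville (fun x => x) false)
    (PySem.List.sorted_pairwise scoville (fun x => x))
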